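-- pv_equiv track=rewrite | github.com/kshitij000806/GeeksForGeeks-POD | 10OCT.py | rotateDelete
-- ===== SOURCE A (Python) =====
-- def rotateDelete(arr):
--     n = len(arr)
--     k = 1
--     while n > 1:
--         arr.insert(0, arr.pop())
--         id = n - k
--         if id < 0:
--             id = 0
--         arr.pop(id)
--         k += 1
--         n -= 1
--
--     return arr[0]
-- ===== SOURCE B (Python) =====
-- def rotateDelete(arr):
--     # Backward index-tracking: instead of simulating rotate+delete on the list,
--     # trace the survivor's index back through each step in reverse, O(n) time,
--     # no mutation of arr (A mutates its argument; return value is the same).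
--     n = len(arr)
--     pos = 0
--     i = n - 1
--     while i > 0:
--         s = n - i + 1          # size of the list at entry of step i
--         id = n - 2 * i + 1     # deletion index at step i (clamped at 0)
--         if id < 0:
--             id = 0
--         m = pos if pos < id else pos + 1   # index in the rotated list
--         pos = s - 1 if m == 0 else m - 1   # index before the rotation
--         i -= 1
--     return arr[pos]
-- ===== Notes on version B (the rewrite author's own statement) =====
-- stated objective: faster
-- what changed: Replaces A's O(n^2) in-place simulation (rotate by insert/pop and delete each round) with an O(n) backward pass that traces the survivor's index through the steps in reverse and indexes the original list once; B does not mutate arr.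
import Mathlib
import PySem

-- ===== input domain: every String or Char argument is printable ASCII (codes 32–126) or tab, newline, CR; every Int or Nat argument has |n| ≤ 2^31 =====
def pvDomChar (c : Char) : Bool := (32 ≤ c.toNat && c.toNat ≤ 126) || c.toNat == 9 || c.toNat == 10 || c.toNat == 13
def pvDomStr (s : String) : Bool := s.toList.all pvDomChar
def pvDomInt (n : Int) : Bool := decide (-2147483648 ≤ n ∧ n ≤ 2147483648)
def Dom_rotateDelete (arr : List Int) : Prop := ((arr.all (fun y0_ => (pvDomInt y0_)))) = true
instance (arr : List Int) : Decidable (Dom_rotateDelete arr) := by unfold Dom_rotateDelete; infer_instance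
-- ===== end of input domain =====

-- B replaces A's O(n^2) in-place rotate-and-delete simulation by an O(n) backward pass that
-- traces the survivor's index through each step in reverse (A mutates its argument, B does not;
-- the equivalence proved here is about the return value).

-- ===== PORT A =====
-- while n > 1: arr.insert(0, arr.pop()); pop at id = max(n-k,0); k += 1; n -= 1.
-- The loop runs exactly (n-1) times (n decreases by 1 each pass), so fuel (n-1).toNat is exact.
def rotADloop : Nat → List Int → Int → Int → List Int
  | 0, arr, _, _ => arr
  | fuel+1, arr, n, k =>
    if n > 1 then
      match PySem.List.pop? arr with          -- arr.pop()
      | none => arr                            -- unreachable: Python raises only on empty arr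
      | some (x, rest) =>
        let arr1 := PySem.List.insert rest 0 x -- arr.insert(0, ·)
        let id0 : Int := n - k
        let id : Int := if id0 < 0 then 0 else id0
        match PySem.List.pop? arr1 id with     -- arr.pop(id)
        | none => arr1                         -- unreachable for inputs admitted by Pre_
        | some (_, arr2) => rotADloop fuel arr2 (n - 1) (k + 1)
    else arr

def rotateDelete (arr : List Int) : Int :=
  let n : Int := arr.length
  let res := rotADloop (n - 1).toNat arr n 1
  (PySem.List.pyGet? res 0).getD 0             -- final indexing of the first element; Pre_ excludes the IndexError case

-- ===== PORT B =====
-- while i > 0: s = n-i+1; id = max(n-2i+1, 0); m = pos if pos<id else pos+1;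
--              pos = s-1 if m==0 else m-1; i -= 1.   (i counts down, ported as the Nat counter)
def rotADback (n : Int) : Nat → Int → Int
  | 0, pos => pos
  | i+1, pos =>
      let ii : Int := (i : Int) + 1
      let s : Int := n - ii + 1
      let id0 : Int := n - 2 * ii + 1
      let id : Int := if id0 < 0 then 0 else id0
      let m : Int := if pos < id then pos else pos + 1
      rotADback n i (if m = 0 then s - 1 else m - 1)

def rotateDelete_alt (arr : List Int) : Int :=
  let n : Int := arr.length
  let pos := rotADback n (n - 1).toNat 0
  (PySem.List.pyGet? arr pos).getD 0           -- index the original list at the traced position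

-- ===== PRECONDITION & SPEC =====
-- Pre_ excludes only the empty list, on which A (and B) raise IndexError at the final indexing.
def Pre_rotateDelete (arr : List Int) : Prop := arr ≠ []
instance (arr : List Int) : Decidable (Pre_rotateDelete arr) := by unfold Pre_rotateDelete; infer_instance
def pvWitness_rotateDelete : List Int := ([3, 1, 4, 1, 5] : List Int)

def Spec_rotateDelete (arr : List Int) (out : Int) : Prop := out = rotateDelete_alt arr
instance (arr : List Int) (out : Int) : Decidable (Spec_rotateDelete arr out) := by unfold Spec_rotateDelete; infer_instance

-- ===== CLAIM (what is proved, stated in full; the proofs are below) =====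
def Claim_equal_rotateDelete : Prop := ∀ (arr : List Int), Dom_rotateDelete arr → Pre_rotateDelete arr → Spec_rotateDelete arr (rotateDelete arr)

-- ===== LEMMAS AND PROOFS =====

-- One backward step of B, as a function (s, id from N and the step number j).
def rdStep (N j p : Int) : Int :=
  let s : Int := N - j + 1
  let id0 : Int := N - 2 * j + 1
  let id : Int := if id0 < 0 then 0 else id0
  let m : Int := if p < id then p else p + 1
  if m = 0 then s - 1 else m - 1

-- Composition of the steps j, j+1, …, j+f-1 with step j outermost.
def rdComp (N : Int) : Nat → Int → Int → Int
  | 0, _, p => p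
  | f+1, j, p => rdStep N j (rdComp N f (j+1) p)

theorem rdComp_snoc (N : Int) (f : Nat) (j p : Int) :
    rdComp N (f+1) j p = rdComp N f j (rdStep N (j + f) p) := by
  induction f generalizing j p with
  | zero => simp [rdComp]
  | succ f ih =>
      show rdStep N j (rdComp N (f+1) (j+1) p) = rdStep N j (rdComp N f (j+1) (rdStep N (j + ((f:Int)+1)) p))
      rw [ih, show j + 1 + (f:Int) = j + ((f:Int) + 1) from by ring]

-- B's countdown loop computes the composition of steps f, …, 1 with step 1 outermost.
theorem rotADback_eq_rdComp (N : Int) (f : Nat) (p : Int) :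
    rotADback N f p = rdComp N f 1 p := by
  induction f generalizing p with
  | zero => rfl
  | succ f ih =>
      show rotADback N f _ = _
      rw [ih, rdComp_snoc, show (1:Int) + (f:Int) = (f:Int) + 1 from by ring]
      congr 1

-- The survivor index stays in range.
theorem rdComp_range (N : Int) (f : Nat) (j : Int) (hj : j = N - f) :
    0 ≤ rdComp N f j 0 ∧ rdComp N f j 0 < (f : Int) + 1 := by
  induction f generalizing j with
  | zero => simp [rdComp]
  | succ f ih =>
      obtain ⟨h1, h2⟩ := ih (j+1) (by push_cast at hj ⊢; omega)
      have hstep : rdComp N (f+1) j 0 = rdStep N j (rdComp N f (j+1) 0) := rfl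
      rw [hstep]
      simp only [rdStep]
      push_cast at hj ⊢
      split_ifs <;> omega

-- One rotate-and-delete step of A, read as an index transformation on the original list.
theorem rdStep_getD (ys : List Int) (x : Int) (d q : Nat) (_hd : d ≤ ys.length)
    (hq : q < ys.length) :
    ((x :: ys).eraseIdx d).getD q 0 =
      (ys ++ [x]).getD (if (if q < d then q else q + 1) = 0 then ys.length else
        (if q < d then q else q + 1) - 1) 0 := by
  by_cases h : q < d
  · simp only [if_pos h]
    rw [List.getD_eq_getElem?_getD, List.getElem?_eraseIdx, if_pos h,
        List.getD_eq_getElem?_getD]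
    cases q with
    | zero =>
        rw [if_pos rfl]
        simp
    | succ q' =>
        rw [if_neg (Nat.succ_ne_zero q'), Nat.add_sub_cancel, List.getElem?_cons_succ,
            List.getElem?_append_left (by omega)]
  · simp only [if_neg h]
    have : q + 1 ≠ 0 := by omega
    rw [if_neg this]
    rw [List.getD_eq_getElem?_getD, List.getElem?_eraseIdx, if_neg h,
        List.getD_eq_getElem?_getD, List.getElem?_cons_succ,
        Nat.add_sub_cancel, List.getElem?_append_left hq]

-- A's loop, started at size f+1 with counter j = N - f, ends in the singleton
-- whose element sits at index rdComp N f j 0 of the starting list.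
theorem rotADloop_eq (f : Nat) : ∀ (arr : List Int) (j N : Int),
    arr.length = f + 1 → j = N - f → 1 ≤ j →
    rotADloop f arr ((f : Int) + 1) j = [arr.getD (rdComp N f j 0).toNat 0] := by
  induction f with
  | zero =>
      intro arr j N hlen _ _
      match arr, hlen with
      | [a], _ => simp [rotADloop, rdComp]
  | succ f ih =>
      intro arr j N hlen hj hj1
      obtain ⟨ys, x, rfl⟩ : ∃ ys x, arr = ys ++ [x] := by
        rcases List.eq_nil_or_concat arr with h | ⟨ys, x, h⟩
        · simp [h] at hlen
        · exact ⟨ys, x, by rw [h, List.concat_eq_append]⟩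
      have hys : ys.length = f + 1 := by
        simpa using hlen
      have hgt : ((f : Int) + 1 + 1) > 1 := by omega
      rw [show rotADloop (f+1) (ys ++ [x]) ((↑(f+1) : Int) + 1) j
            = rotADloop (f+1) (ys ++ [x]) (((f:Int) + 1) + 1) j from by push_cast; ring_nf]
      unfold rotADloop
      rw [if_pos hgt, PySem.List.pop?_last]
      dsimp only
      rw [PySem.List.insert_zero]
      set id0 : Int := ((f:Int) + 1 + 1) - j with hid0
      set idq : Int := if id0 < 0 then 0 else id0 with hidq
      have hid_nonneg : 0 ≤ idq := by rw [hidq]; split_ifs <;> omega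
      have hid_lt : idq.toNat < (x :: ys).length := by
        simp only [List.length_cons, hys]
        have : idq ≤ (f:Int) + 1 := by rw [hidq, hid0]; split_ifs <;> omega
        omega
      rw [show idq = ((idq.toNat : Nat) : Int) from (Int.toNat_of_nonneg hid_nonneg).symm,
          PySem.List.pop?_natCast _ _ hid_lt]
      dsimp only
      have hlen2 : ((x :: ys).eraseIdx idq.toNat).length = f + 1 := by
        rw [List.length_eraseIdx, if_pos hid_lt]; simp [hys]
      rw [show ((f:Int) + 1 + 1 - 1) = (f:Int) + 1 from by ring]
      rw [ih _ (j+1) N hlen2 (by push_cast at hj ⊢; omega) (by omega)]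
      -- now reduce to the step lemma
      congr 1
      have hrange := rdComp_range N f (j+1) (by push_cast at hj ⊢; omega)
      set q : Int := rdComp N f (j+1) 0 with hqdef
      have hstep : rdComp N (f+1) j 0 = rdStep N j q := rfl
      rw [hstep]
      have hqn : q.toNat < ys.length := by omega
      have hdn : idq.toNat ≤ ys.length := by omega
      rw [rdStep_getD ys x idq.toNat q.toNat hdn hqn]
      -- match the Int-level index with the Nat-level index
      simp only [rdStep]
      have hs : N - j + 1 = (f:Int) + 2 := by omega
      have hq0 : 0 ≤ q := hrange.1
      rw [show N - 2*j + 1 = id0 from by omega, ← hidq]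
      by_cases hqlt : q < idq
      · rw [if_pos (by omega : q.toNat < idq.toNat), if_pos hqlt]
        by_cases hz : q = 0
        · rw [if_pos (by omega : q.toNat = 0), if_pos hz, hys]; congr 1; omega
        · rw [if_neg (by omega : ¬ q.toNat = 0), if_neg hz]; congr 1; omega
      · rw [if_neg (by omega : ¬ q.toNat < idq.toNat), if_neg hqlt,
            if_neg (by omega : ¬ q.toNat + 1 = 0), if_neg (by omega : ¬ q + 1 = 0)]
        congr 1
        omega

-- ===== VERDICT (by name: the statement is the Claim_ definition above) =====
theorem rotateDelete_spec : Claim_equal_rotateDelete := by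
  intro arr _ hpre
  have hlen : 0 < arr.length := List.length_pos_iff.mpr hpre
  unfold Spec_rotateDelete
  simp only [rotateDelete, rotateDelete_alt]
  have hF : ((arr.length : Int) - 1).toNat = arr.length - 1 := by omega
  rw [hF]
  have hN : (arr.length : Int) = ((arr.length - 1 : Nat) : Int) + 1 := by omega
  rw [hN]
  set N : Int := ((arr.length - 1 : Nat) : Int) + 1 with hNdef
  have hA := rotADloop_eq (arr.length - 1) arr 1 N (by omega) (by omega) (by omega)
  rw [hA, rotADback_eq_rdComp]
  obtain ⟨hp0, hp1⟩ := rdComp_range N (arr.length - 1) 1 (by omega)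
  set p : Int := rdComp N (arr.length - 1) 1 0 with hpdef
  rw [PySem.List.pyGet?_zero_cons, PySem.List.pyGet?_of_nonneg arr hp0]
  simp [List.getD_eq_getElem?_getD]
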